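-- pv_equiv track=rewrite | github.com/explosion/spaCy | bin/ud/ud_run_test.py | guess_fused_orths
-- ===== SOURCE A (Python) =====
-- def guess_fused_orths(word, ud_forms):
--     """The UD data 'fused tokens' don't necessarily expand to keys that match
--     the form. We need orths that exact match the string. Here we make a best
--     effort to divide up the word."""
--     if word == "".join(ud_forms):
--         # Happy case: we get a perfect split, with each letter accounted for.
--         return ud_forms
--     elif len(word) == sum(len(subtoken) for subtoken in ud_forms):
--         # Unideal, but at least lengths match.
--         output = []
--         remain = word
--         for subtoken in ud_forms:
--             assert len(subtoken) >= 1
--             output.append(remain[: len(subtoken)])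
--             remain = remain[len(subtoken) :]
--         assert len(remain) == 0, (word, ud_forms, remain)
--         return output
--     else:
--         # Let's say word is 6 long, and there are three subtokens. The orths
--         # *must* equal the original string. Arbitrarily, split [4, 1, 1]
--         first = word[: len(word) - (len(ud_forms) - 1)]
--         output = [first]
--         remain = word[len(first) :]
--         for i in range(1, len(ud_forms)):
--             assert remain
--             output.append(remain[:1])
--             remain = remain[1:]
--         assert len(remain) == 0, (word, output, remain)
--         return output
-- ===== SOURCE B (Python) =====
-- def guess_fused_orths(word, ud_forms):
--     """The UD data 'fused tokens' don't necessarily expand to keys that match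
--     the form. We need orths that exact match the string. Here we make a best
--     effort to divide up the word."""
--     if word == "".join(ud_forms):
--         # Perfect split: return the forms themselves.
--         return ud_forms
--     # Otherwise compute one schedule of segment lengths, then cut the word
--     # along it in a single positional loop.
--     if len(word) == sum(len(f) for f in ud_forms):
--         lengths = [len(f) for f in ud_forms]
--     else:
--         lengths = [len(word) - (len(ud_forms) - 1)] + [1] * (len(ud_forms) - 1)
--     output = []
--     pos = 0
--     for n in lengths:
--         output.append(word[pos:pos + n])
--         pos += n
--     return output
-- ===== Notes on version B (the rewrite author's own statement) =====
-- stated objective: faster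
-- what changed: Instead of A's two branch-specific slicing loops that repeatedly re-slice a shrinking 'remain' copy of the string, B computes a single list of segment lengths (the forms' lengths, or the [n-(k-1),1,...,1] fallback) and cuts the word once in one positional loop over that schedule.
import Mathlib
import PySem

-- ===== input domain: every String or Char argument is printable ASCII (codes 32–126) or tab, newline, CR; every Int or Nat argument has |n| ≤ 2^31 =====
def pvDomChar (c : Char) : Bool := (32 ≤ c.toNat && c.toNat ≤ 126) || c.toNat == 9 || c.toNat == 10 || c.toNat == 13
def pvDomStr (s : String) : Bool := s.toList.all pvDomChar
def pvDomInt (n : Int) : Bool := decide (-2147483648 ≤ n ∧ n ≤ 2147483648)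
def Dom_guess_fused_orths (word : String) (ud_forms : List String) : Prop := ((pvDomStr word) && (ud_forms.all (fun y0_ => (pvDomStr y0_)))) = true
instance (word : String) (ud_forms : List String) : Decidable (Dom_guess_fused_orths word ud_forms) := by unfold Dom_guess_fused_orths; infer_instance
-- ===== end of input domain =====

-- B replaces A's two branch-specific slicing loops over a shrinking `remain` string by a single
-- schedule of segment lengths that cuts the word once in one positional loop, avoiding the
-- repeated copying of the shrinking remainder (objective: faster, measured).

-- ===== PORT A =====
def guess_fused_orths (word : String) (ud_forms : List String) : List String :=
  if word = PySem.Str.join "" ud_forms then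
    ud_forms
  else if PySem.Str.len word = (ud_forms.map (fun s => PySem.Str.len s)).sum then
    -- the asserts hold on Pre_ (every subtoken nonempty), so the loop is ported without them
    (ud_forms.foldl
      (fun (st : List String × String) sub =>
        (st.1 ++ [PySem.Str.slice st.2 none (some (PySem.Str.len sub))],
         PySem.Str.slice st.2 (some (PySem.Str.len sub)) none))
      ([], word)).1
  else
    -- the asserts hold on Pre_ (word no shorter than len(ud_forms)-1), ported without them
    let first := PySem.Str.slice word none (some (PySem.Str.len word - ((ud_forms.length : Int) - 1)))
    ((PySem.List.pyRange 1 (ud_forms.length : Int) 1).foldl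
      (fun (st : List String × String) _ =>
        (st.1 ++ [PySem.Str.slice st.2 none (some 1)],
         PySem.Str.slice st.2 (some 1) none))
      ([first], PySem.Str.slice word (some (PySem.Str.len first)) none)).1

-- ===== PORT B =====
def guess_fused_orths_alt (word : String) (ud_forms : List String) : List String :=
  if word = PySem.Str.join "" ud_forms then
    ud_forms
  else
    let lengths : List Int :=
      if PySem.Str.len word = (ud_forms.map (fun s => PySem.Str.len s)).sum then
        ud_forms.map (fun s => PySem.Str.len s)
      else
        (PySem.Str.len word - ((ud_forms.length : Int) - 1)) :: List.replicate (ud_forms.length - 1) (1 : Int)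
    (lengths.foldl
      (fun (st : List String × Int) n =>
        (st.1 ++ [PySem.Str.slice word (some st.2) (some (st.2 + n))], st.2 + n))
      ([], 0)).1

-- ===== PRECONDITION & SPEC =====
-- Pre_ excludes exactly the inputs where A raises AssertionError: in the length-matched branch an
-- empty ud_form, and in the fallback branch a word shorter than len(ud_forms)-1.
def Pre_guess_fused_orths (word : String) (ud_forms : List String) : Prop :=
  word = PySem.Str.join "" ud_forms ∨
  (PySem.Str.len word = (ud_forms.map (fun s => PySem.Str.len s)).sum ∧ "" ∉ ud_forms) ∨
  (PySem.Str.len word ≠ (ud_forms.map (fun s => PySem.Str.len s)).sum ∧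
    (ud_forms.length : Int) - 1 ≤ PySem.Str.len word)
instance (word : String) (ud_forms : List String) : Decidable (Pre_guess_fused_orths word ud_forms) := by
  unfold Pre_guess_fused_orths; infer_instance

def pvWitness_guess_fused_orths : String × List String := ("abc", ["ab", "c"])

def Spec_guess_fused_orths (word : String) (ud_forms : List String) (out : List String) : Prop := out = guess_fused_orths_alt word ud_forms
instance (word : String) (ud_forms : List String) (out : List String) : Decidable (Spec_guess_fused_orths word ud_forms out) := by unfold Spec_guess_fused_orths; infer_instance

-- ===== CLAIM (what is proved, stated in full; the proofs are below) =====
def Claim_equal_guess_fused_orths : Prop := ∀ (word : String) (ud_forms : List String), Dom_guess_fused_orths word ud_forms → Pre_guess_fused_orths word ud_forms → Spec_guess_fused_orths word ud_forms (guess_fused_orths word ud_forms)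

-- ===== LEMMAS AND PROOFS =====

theorem pv_strext {s t : String} (h : s.toList = t.toList) : s = t := String.toList_inj.mp h

theorem pv_slice_zero (w : String) : PySem.Str.slice w (some 0) none = w := by
  apply pv_strext
  simp [PySem.Str.toList_slice, PySem.Chars.slice_eq_listSlice,
        PySem.List.slice_from w.toList (le_refl (0 : Int))]

theorem pv_slice_slice_to (w : String) (pos n : Int) (hpos : 0 ≤ pos) (hn : 0 ≤ n) :
    PySem.Str.slice (PySem.Str.slice w (some pos) none) none (some n)
      = PySem.Str.slice w (some pos) (some (pos + n)) := by
  apply pv_strext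
  simp only [PySem.Str.toList_slice, PySem.Chars.slice_eq_listSlice]
  rw [PySem.List.slice_from _ hpos, PySem.List.slice_to _ hn,
      PySem.List.slice_toNat _ hpos (by omega : (0:Int) ≤ pos + n)]
  congr 1
  omega

theorem pv_slice_slice_from (w : String) (pos n : Int) (hpos : 0 ≤ pos) (hn : 0 ≤ n) :
    PySem.Str.slice (PySem.Str.slice w (some pos) none) (some n) none
      = PySem.Str.slice w (some (pos + n)) none := by
  apply pv_strext
  simp only [PySem.Str.toList_slice, PySem.Chars.slice_eq_listSlice]
  rw [PySem.List.slice_from _ hpos, PySem.List.slice_from _ hn,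
      PySem.List.slice_from _ (by omega : (0:Int) ≤ pos + n), List.drop_drop]
  congr 1
  omega

theorem pv_len_slice_to (w : String) (n : Int) (hn : 0 ≤ n) (hle : n ≤ PySem.Str.len w) :
    PySem.Str.len (PySem.Str.slice w none (some n)) = n := by
  rw [PySem.Str.len_eq] at hle ⊢
  rw [PySem.Str.toList_slice, PySem.Chars.slice_eq_listSlice, PySem.List.slice_to _ hn]
  simp only [List.length_take]
  omega

-- A's two folds cut the same segments as B's positional fold: A slices a shrinking remainder
-- (here written as word[pos:]), B slices the word at accumulated positions.
theorem pv_foldAB (ns : List Int) (w : String) (pos : Int) (acc : List String)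
    (hns : ∀ n ∈ ns, 0 ≤ n) (hpos : 0 ≤ pos) :
    (ns.foldl
      (fun (st : List String × String) n =>
        (st.1 ++ [PySem.Str.slice st.2 none (some n)],
         PySem.Str.slice st.2 (some n) none))
      (acc, PySem.Str.slice w (some pos) none)).1
    = (ns.foldl
      (fun (st : List String × Int) n =>
        (st.1 ++ [PySem.Str.slice w (some st.2) (some (st.2 + n))], st.2 + n))
      (acc, pos)).1 := by
  induction ns generalizing pos acc with
  | nil => rfl
  | cons n ns ih =>
    have hn : 0 ≤ n := hns n (List.mem_cons_self ..)
    simp only [List.foldl_cons]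
    rw [pv_slice_slice_to w pos n hpos hn, pv_slice_slice_from w pos n hpos hn]
    exact ih _ _ (fun m hm => hns m (List.mem_cons_of_mem _ hm)) (by omega)

-- A's length-matched loop over the forms is the same fold over the list of their lengths
theorem pv_foldA_map (ud_forms : List String) (init : List String × String) :
    ud_forms.foldl
      (fun (st : List String × String) sub =>
        (st.1 ++ [PySem.Str.slice st.2 none (some (PySem.Str.len sub))],
         PySem.Str.slice st.2 (some (PySem.Str.len sub)) none))
      init
    = (ud_forms.map (fun s => PySem.Str.len s)).foldl
      (fun (st : List String × String) n =>
        (st.1 ++ [PySem.Str.slice st.2 none (some n)],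
         PySem.Str.slice st.2 (some n) none))
      init := by
  induction ud_forms generalizing init with
  | nil => rfl
  | cons _ _ ih => simp only [List.foldl_cons, List.map_cons]; exact ih _

-- A's fallback loop ignores the range elements: it equals the fold over a replicated-1 schedule
theorem pv_foldA_count (l : List Int) (m : Nat) (h : l.length = m) (init : List String × String) :
    l.foldl
      (fun (st : List String × String) _ =>
        (st.1 ++ [PySem.Str.slice st.2 none (some 1)],
         PySem.Str.slice st.2 (some 1) none))
      init
    = (List.replicate m (1 : Int)).foldl
      (fun (st : List String × String) n =>
        (st.1 ++ [PySem.Str.slice st.2 none (some n)],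
         PySem.Str.slice st.2 (some n) none))
      init := by
  subst h
  induction l generalizing init with
  | nil => rfl
  | cons _ _ ih =>
    simp only [List.length_cons, List.replicate_succ, List.foldl_cons]
    exact ih _

theorem pv_pyRange_len (k : Nat) : (PySem.List.pyRange 1 (k : Int) 1).length = k - 1 := by
  induction k with
  | zero => decide
  | succ m ih =>
    cases m with
    | zero => decide
    | succ m' =>
      have h1 : (1 : Int) ≤ ((m' + 1 : Nat) : Int) := by push_cast; omega
      have hc : ((m' + 1 + 1 : Nat) : Int) = ((m' + 1 : Nat) : Int) + 1 := by push_cast; ring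
      rw [hc, PySem.List.pyRange_one_succ_right h1]
      simp only [List.length_append, List.length_cons, List.length_nil, ih]
      omega

-- ===== VERDICT (by name: the statement is the Claim_ definition above) =====
theorem guess_fused_orths_spec : Claim_equal_guess_fused_orths := by
  intro word ud_forms _ hpre
  unfold Spec_guess_fused_orths guess_fused_orths guess_fused_orths_alt
  have hw : (0 : Int) ≤ PySem.Str.len word := by
    rw [PySem.Str.len_eq]; positivity
  by_cases h1 : word = PySem.Str.join "" ud_forms
  · simp [h1]
  · rw [if_neg h1]
    simp only [if_neg h1]
    by_cases h2 : PySem.Str.len word = (ud_forms.map (fun s => PySem.Str.len s)).sum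
    · rw [if_pos h2]
      simp only [if_pos h2]
      rw [pv_foldA_map]
      have hfold := pv_foldAB (ud_forms.map (fun s => PySem.Str.len s)) word 0 []
        (by intro n hn
            simp only [List.mem_map] at hn
            obtain ⟨s, _, rfl⟩ := hn
            rw [PySem.Str.len_eq]; positivity)
        (le_refl 0)
      rw [pv_slice_zero word] at hfold
      exact hfold
    · rw [if_neg h2]
      simp only [if_neg h2]
      have hk : (ud_forms.length : Int) - 1 ≤ PySem.Str.len word := by
        rcases hpre with h | ⟨h, _⟩ | ⟨_, h⟩
        · exact absurd h h1
        · exact absurd h h2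
        · exact h
      set n0 : Int := PySem.Str.len word - ((ud_forms.length : Int) - 1) with hn0def
      have hn0 : 0 ≤ n0 := by rw [hn0def]; omega
      cases ud_forms with
      | nil =>
        have hpr : PySem.List.pyRange 1 (((List.nil (α := String)).length : Nat) : Int) 1 = [] := by
          decide
        rw [hpr]
        simp only [List.foldl_nil, List.length_nil, Nat.zero_sub, List.replicate_zero,
          List.foldl_cons]
        congr 1
        apply pv_strext
        simp only [PySem.Str.toList_slice, PySem.Chars.slice_eq_listSlice]
        rw [zero_add, PySem.List.slice_zero_start]
      | cons f rest =>
        have hn0le : n0 ≤ PySem.Str.len word := by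
          rw [hn0def]
          have : 1 ≤ (f :: rest).length := by simp
          omega
        have hlenfirst :
            PySem.Str.len (PySem.Str.slice word none (some n0)) = n0 :=
          pv_len_slice_to word n0 hn0 hn0le
        rw [hlenfirst]
        rw [pv_foldA_count (PySem.List.pyRange 1 (((f :: rest).length : Nat) : Int) 1)
              ((f :: rest).length - 1) (pv_pyRange_len _) _]
        rw [pv_foldAB (List.replicate ((f :: rest).length - 1) (1 : Int)) word n0
              [PySem.Str.slice word none (some n0)]
              (by intro n hn; rw [List.eq_of_mem_replicate hn]; omega) hn0]
        have hhead : PySem.Str.slice word (some 0) (some (0 + n0))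
            = PySem.Str.slice word none (some n0) := by
          apply pv_strext
          simp only [PySem.Str.toList_slice, PySem.Chars.slice_eq_listSlice]
          rw [zero_add, PySem.List.slice_zero_start]
        conv_rhs => rw [List.foldl_cons]
        rw [hhead, zero_add]
        simp
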